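-- pv_equiv track=rewrite | github.com/leaty-ell/practicum-15 | tsk13.py | odd_list
-- ===== SOURCE A (Python) =====
-- def odd_list(a, n) -> list:
--     """
--     Recursive function to return list of even numbers.
--
--     Args:
--         a (list): List of integers
--         n (int): Number of elements (optional)
--
--     Returns:
--         list: List containing only even numbers
--     """
--     if n is None:
--         n = len(a)
--
--     if n == 0:
--         return []
--     else:
--         rest_even = odd_list(a[1:], n - 1)
--         if a[0] % 2 == 0:
--             return [a[0]] + rest_even
--         else:
--             return rest_even
-- ===== SOURCE B (Python) =====
-- def odd_list(a, n) -> list: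
--     """Iterative re-implementation: index the first n elements, keep the even ones."""
--     if n is None:
--         n = len(a)
--     result = []
--     for i in range(n):
--         if a[i] % 2 == 0:
--             result.append(a[i])
--     return result
-- ===== Notes on version B (the rewrite author's own statement) =====
-- stated objective: faster
-- what changed: Replaced the slice-building recursion (which copies a[1:] at every step, quadratic work) with a single iterative indexing loop appending even elements; same left-to-right order.
import Mathlib
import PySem

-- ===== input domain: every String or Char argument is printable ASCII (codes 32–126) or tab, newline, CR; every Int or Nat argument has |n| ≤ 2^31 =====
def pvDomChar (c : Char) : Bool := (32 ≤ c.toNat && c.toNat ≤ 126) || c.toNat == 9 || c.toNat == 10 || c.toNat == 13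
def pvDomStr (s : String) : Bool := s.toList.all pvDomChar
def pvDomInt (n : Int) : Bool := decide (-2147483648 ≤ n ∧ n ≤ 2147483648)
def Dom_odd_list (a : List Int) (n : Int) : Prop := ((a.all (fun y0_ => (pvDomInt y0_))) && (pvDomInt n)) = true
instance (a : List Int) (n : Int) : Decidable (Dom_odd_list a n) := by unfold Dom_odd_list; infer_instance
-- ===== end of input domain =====

-- B replaces A's slice-copying recursion with one iterative indexing loop (simpler, no per-step list copies).
-- Return-value equivalence only; neither version mutates its arguments.

-- ===== PORT A =====
-- A's recursion: if n == 0 return []; else recurse on a[1:] with n-1 and prepend a[0] if even.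
-- The '[]' branch for empty a with n ≠ 0 is where Python raises IndexError on a[0]; Pre_ excludes it,
-- as it excludes n < 0, where A recurses forever.
def odd_list (a : List Int) (n : Int) : List Int :=
  if n == 0 then []
  else
    match a with
    | [] => []
    | x :: rest =>
      let rest_even := odd_list rest (n - 1)
      if PySem.Int.mod x 2 == 0 then x :: rest_even else rest_even

-- ===== PORT B =====
-- B's loop: for i in range(n): if a[i] % 2 == 0: result.append(a[i]).
-- pyGetD is exact for in-range indices (guaranteed by Pre_).
def odd_list_alt (a : List Int) (n : Int) : List Int :=
  (PySem.List.pyRange 0 n 1).foldl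
    (fun result i =>
      if PySem.Int.mod (PySem.List.pyGetD a i 0) 2 == 0
      then result ++ [PySem.List.pyGetD a i 0] else result) []

-- ===== PRECONDITION & SPEC =====
-- Pre_ excludes n < 0 (A: infinite recursion → RecursionError) and n > len(a) (A: IndexError on a[0]);
-- on both regions Python A never returns a value.
def Pre_odd_list (a : List Int) (n : Int) : Prop := 0 ≤ n ∧ n ≤ a.length
instance (a : List Int) (n : Int) : Decidable (Pre_odd_list a n) := by unfold Pre_odd_list; infer_instance
def pvWitness_odd_list : List Int × Int := ([3, 4, 7, 10], 3)

def Spec_odd_list (a : List Int) (n : Int) (out : List Int) : Prop := out = odd_list_alt a n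
instance (a : List Int) (n : Int) (out : List Int) : Decidable (Spec_odd_list a n out) := by unfold Spec_odd_list; infer_instance

-- ===== CLAIM (what is proved, stated in full; the proofs are below) =====
def Claim_equal_odd_list : Prop := ∀ (a : List Int) (n : Int), Dom_odd_list a n → Pre_odd_list a n → Spec_odd_list a n (odd_list a n)

-- ===== LEMMAS AND PROOFS =====

-- A computes: the even elements of the first n elements, in order.
theorem odd_list_eq_filter_take (a : List Int) (n : Int) (h0 : 0 ≤ n) (hn : n ≤ a.length) :
    odd_list a n = (a.take n.toNat).filter (fun x => PySem.Int.mod x 2 == 0) := by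
  induction a generalizing n with
  | nil =>
    simp at hn
    have : n = 0 := le_antisymm hn h0
    subst this; simp [odd_list]
  | cons x rest ih =>
    by_cases hz : n = 0
    · subst hz; simp [odd_list]
    · have h1 : (0:Int) ≤ n - 1 := by omega
      have h2 : n - 1 ≤ (rest.length : Int) := by simp at hn ⊢; omega
      have ht : n.toNat = (n-1).toNat + 1 := by omega
      rw [odd_list]
      have hb : (n == 0) = false := by simpa using hz
      rw [hb, ih (n-1) h1 h2, ht]
      simp only [List.take_succ_cons, List.filter_cons]
      cases he : PySem.Int.mod x 2 == 0 <;> simp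

-- pushing a map through a filter (used to read B's loop as filter-of-prefix)
theorem map_filter_swap {α β : Type} (f : α → β) (p : β → Bool) (l : List α) :
    (l.filter (fun i => p (f i))).map f = (l.map f).filter p := by
  induction l with
  | nil => simp
  | cons x xs ih =>
    simp only [List.filter_cons, List.map_cons]
    cases h : p (f x) <;> simp [ih]

-- B's loop over range(n), with in-range indexing, collects the same filtered prefix.
theorem odd_list_alt_eq_filter_take (a : List Int) (n : Int) (_h0 : 0 ≤ n) (hn : n ≤ a.length) :
    odd_list_alt a n = (a.take n.toNat).filter (fun x => PySem.Int.mod x 2 == 0) := by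
  unfold odd_list_alt
  rw [PySem.List.foldl_append_if (p := fun i => PySem.Int.mod (PySem.List.pyGetD a i 0) 2 == 0)
      (f := fun i => PySem.List.pyGetD a i 0)]
  have hmap : (PySem.List.pyRange 0 n 1).map (fun i => PySem.List.pyGetD a i 0) = a.take n.toNat := by
    rw [PySem.List.pyRange_one]
    simp only [sub_zero]
    apply List.ext_getElem
    · simp; omega
    · intro k hk1 hk2
      simp only [List.getElem_map, List.getElem_range, List.getElem_take]
      have hk : k < n.toNat := by simpa using hk1
      have hkl : k < a.length := by omega
      rw [zero_add, PySem.List.pyGetD_natCast]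
      exact List.getD_eq_getElem a 0 hkl
  rw [List.nil_append]
  exact (map_filter_swap (fun i => PySem.List.pyGetD a i 0)
    (fun x => PySem.Int.mod x 2 == 0) (PySem.List.pyRange 0 n 1)).trans (by rw [hmap])

-- ===== VERDICT (by name: the statement is the Claim_ definition above) =====
theorem odd_list_spec : Claim_equal_odd_list := by
  intro a n _ hpre
  unfold Spec_odd_list
  rw [odd_list_eq_filter_take a n hpre.1 hpre.2, odd_list_alt_eq_filter_take a n hpre.1 hpre.2]
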